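-- pv_equiv track=rewrite | github.com/ay0ks/BakaASM | bakaasm.py | dottags_to_header
-- ===== SOURCE A (Python) =====
-- def dottags_to_header(source):
--   _instr = []
--   _dottags = []
--
--   for instr in source:
--     if instr.strip().startswith("._"):
--       _dottags.append(instr)
--     else:
--       _instr.append(instr)
--
--   return _dottags + _instr
-- ===== SOURCE B (Python) =====
-- def dottags_to_header(source):
--   return sorted(source, key=lambda instr: not instr.strip().startswith("._"))
-- ===== Notes on version B (the rewrite author's own statement) =====
-- stated objective: idiomatic
-- what changed: Replaced the explicit two-bucket partition loop by a single stable sorted() call with a boolean key (dottag lines sort first, ties keep original order).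
import Mathlib
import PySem

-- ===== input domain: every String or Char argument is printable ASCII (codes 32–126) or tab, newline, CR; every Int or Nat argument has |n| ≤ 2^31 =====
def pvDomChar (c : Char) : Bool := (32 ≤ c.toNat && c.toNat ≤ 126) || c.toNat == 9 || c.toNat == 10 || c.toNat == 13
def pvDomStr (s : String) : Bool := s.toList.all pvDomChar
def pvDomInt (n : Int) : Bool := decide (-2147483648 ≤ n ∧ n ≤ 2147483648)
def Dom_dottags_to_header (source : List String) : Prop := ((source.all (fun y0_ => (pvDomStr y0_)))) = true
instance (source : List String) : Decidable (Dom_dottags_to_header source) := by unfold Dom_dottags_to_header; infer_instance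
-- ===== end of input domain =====

-- B replaces A's two-bucket partition loop by one stable sorted() call with a boolean key (idiomatic; same return value).

-- ===== PORT A =====
-- the loop over source maintaining the two buckets (_instr, _dottags)
def dottags_to_header (source : List String) : List String :=
  let p := source.foldl
    (fun (p : List String × List String) instr =>
      if PySem.Str.startswith (PySem.Str.strip instr) "._" then (p.1, p.2 ++ [instr])
      else (p.1 ++ [instr], p.2))
    ([], [])
  p.2 ++ p.1

-- ===== PORT B =====
def dottags_to_header_alt (source : List String) : List String :=
  PySem.List.sorted source (fun instr => !(PySem.Str.startswith (PySem.Str.strip instr) "._")) false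

-- ===== PRECONDITION & SPEC =====
def Spec_dottags_to_header (source : List String) (out : List String) : Prop := out = dottags_to_header_alt source
instance (source : List String) (out : List String) : Decidable (Spec_dottags_to_header source out) := by unfold Spec_dottags_to_header; infer_instance

-- ===== CLAIM (what is proved, stated in full; the proofs are below) =====
def Claim_equal_dottags_to_header : Prop := ∀ (source : List String), Dom_dottags_to_header source → Spec_dottags_to_header source (dottags_to_header source)

-- ===== LEMMAS AND PROOFS =====

def pvPred (s : String) : Bool := PySem.Str.startswith (PySem.Str.strip s) "._"

-- A's loop, characterised by filters
lemma a_foldl_eq (xs : List String) (i d : List String) :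
    xs.foldl
      (fun (p : List String × List String) instr =>
        if PySem.Str.startswith (PySem.Str.strip instr) "._" then (p.1, p.2 ++ [instr])
        else (p.1 ++ [instr], p.2)) (i, d)
    = (i ++ xs.filter (fun x => !pvPred x), d ++ xs.filter pvPred) := by
  induction xs generalizing i d with
  | nil => simp
  | cons x xs ih =>
    by_cases hx : pvPred x = true
    · simp only [List.foldl_cons, pvPred] at *
      rw [hx, if_pos rfl, ih]
      simp only [List.filter_cons]
      simp only [PySem.Str.startswith_eq, PySem.Str.toList_strip, show "._".toList = ['.', '_'] from rfl] at hx
      simp [pvPred, hx]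
    · simp only [Bool.not_eq_true] at hx
      simp only [List.foldl_cons, pvPred] at *
      rw [hx]
      simp only [Bool.false_eq_true, if_false]
      rw [ih]
      simp only [List.filter_cons]
      simp only [PySem.Str.startswith_eq, PySem.Str.toList_strip, show "._".toList = ['.', '_'] from rfl] at hx
      simp [pvPred, hx]

-- the boolean-key comparison of B's sort, in terms of pvPred
lemma before_eq (a b : String) :
    decide ((!(PySem.Str.startswith (PySem.Str.strip a) "._")) < (!(PySem.Str.startswith (PySem.Str.strip b) "._")))
    = (pvPred a && !pvPred b) := by
  unfold pvPred
  cases hA : PySem.Str.startswith (PySem.Str.strip a) "._" <;>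
    cases hB : PySem.Str.startswith (PySem.Str.strip b) "._" <;> decide

lemma insertBy_append_of_forall_not_before {α : Type} (before : α → α → Bool) (x : α)
    (d i : List α) (h : ∀ y ∈ d, before x y = false) :
    PySem.List.insertBy before x (d ++ i) = d ++ PySem.List.insertBy before x i := by
  induction d with
  | nil => simp
  | cons y d ih =>
    have hy : before x y = false := h y (by simp)
    have h' : ∀ z ∈ d, before x z = false := fun z hz => h z (by simp [hz])
    simp only [List.cons_append, PySem.List.insertBy, hy, Bool.false_eq_true, if_false]
    rw [ih h']

-- B's insertion-sort loop, run from a partitioned accumulator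
lemma b_foldl_inv (xs : List String) (d i : List String)
    (hd : ∀ a ∈ d, pvPred a = true) (hi : ∀ a ∈ i, pvPred a = false) :
    xs.foldl
      (fun acc x => PySem.List.insertBy (fun a b => pvPred a && !pvPred b) x acc)
      (d ++ i)
    = (d ++ xs.filter pvPred) ++ (i ++ xs.filter (fun x => !pvPred x)) := by
  induction xs generalizing d i with
  | nil => simp
  | cons x xs ih =>
    simp only [List.foldl_cons]
    by_cases hx : pvPred x = true
    · have hstep : PySem.List.insertBy (fun a b => pvPred a && !pvPred b) x (d ++ i)
          = (d ++ [x]) ++ i := by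
        rw [insertBy_append_of_forall_not_before _ _ _ _
              (fun y hy => by simp [hx, hd y hy])]
        cases i with
        | nil => simp [PySem.List.insertBy]
        | cons b i' =>
          have hb : pvPred b = false := hi b (by simp)
          simp [PySem.List.insertBy, hx, hb]
      rw [hstep, ih (d ++ [x]) i
            (by intro a ha; rcases List.mem_append.mp ha with h | h
                · exact hd a h
                · simp at h; subst h; exact hx)
            hi]
      simp [hx]
    · simp only [Bool.not_eq_true] at hx
      have hstep : PySem.List.insertBy (fun a b => pvPred a && !pvPred b) x (d ++ i)
          = d ++ (i ++ [x]) := by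
        rw [PySem.List.insertBy_of_forall_not_before _ _ _
              (fun y hy => by simp [hx])]
        simp
      rw [hstep, ih d (i ++ [x]) hd
            (by intro a ha; rcases List.mem_append.mp ha with h | h
                · exact hi a h
                · simp at h; subst h; exact hx)]
      simp [hx]

-- ===== VERDICT (by name: the statement is the Claim_ definition above) =====
theorem dottags_to_header_spec : Claim_equal_dottags_to_header := by
  intro source _
  unfold Spec_dottags_to_header dottags_to_header dottags_to_header_alt
  rw [PySem.List.sorted_eq_foldl_insertBy]
  simp only [before_eq]
  have hb := b_foldl_inv source [] [] (by simp) (by simp)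
  simp only [List.nil_append] at hb
  rw [hb, a_foldl_eq]
  simp
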